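-- pv_equiv track=rewrite | github.com/sjmiller609/crack_vigenere | crack.py | sort_by_len
-- ===== SOURCE A (Python) =====
-- def sort_by_len(pairs):
--     if len(pairs) == 0: return []
--     results = []
--     shortest_len = 10000000000000000
--     shortest = None
--     for key in pairs:
--         if len(pairs[key]) < shortest_len:
--             shortest_len = len(pairs[key])
--             shortest = key
--     temp = [[shortest,pairs[shortest]]]
--     pairs.pop(shortest)
--     return temp+sort_by_len(pairs)
-- ===== SOURCE B (Python) =====
-- def sort_by_len(pairs):
--     # One stable sort by value length, then a single pass building the
--     # [key, value] rows.  (Return-value equivalent to A; unlike A it does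
--     # not empty the input dict.)
--     return [[k, v] for k, v in sorted(pairs.items(), key=lambda kv: len(kv[1]))]
-- ===== Notes on version B (the rewrite author's own statement) =====
-- stated objective: faster
-- what changed: Replaced A's recursive repeated first-minimum scan-and-pop (O(n^2), deep recursion, empties the input dict) by one stable sort on value length plus a single comprehension pass; return value identical, but B does not mutate the input dict.
import Mathlib
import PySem

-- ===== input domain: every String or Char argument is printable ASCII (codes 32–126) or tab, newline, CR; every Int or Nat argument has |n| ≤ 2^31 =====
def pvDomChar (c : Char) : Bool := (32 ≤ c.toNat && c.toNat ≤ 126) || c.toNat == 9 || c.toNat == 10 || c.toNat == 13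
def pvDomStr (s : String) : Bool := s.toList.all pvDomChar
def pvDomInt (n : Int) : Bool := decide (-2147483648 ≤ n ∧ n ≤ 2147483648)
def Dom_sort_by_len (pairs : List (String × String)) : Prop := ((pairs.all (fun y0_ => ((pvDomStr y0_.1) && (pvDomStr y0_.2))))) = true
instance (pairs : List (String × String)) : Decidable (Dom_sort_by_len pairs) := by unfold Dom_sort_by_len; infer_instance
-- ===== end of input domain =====

-- B replaces A's recursive repeated first-minimum scan-and-pop by one stable sort on value
-- length plus a single mapping pass (asymptotically faster); equivalence is about the RETURN
-- value only: Python A empties its input dict, Python B does not mutate it.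

-- ===== PORT A =====
-- pairs[key] : first-match lookup in the association list (dict semantics under nodup keys);
-- "" stands for Python's KeyError, unreachable under Pre_ (lookups use keys present in pairs).
def pvLookup (pairs : List (String × String)) (k : String) : String :=
  match pairs.find? (fun p => p.1 == k) with
  | some p => p.2
  | none => ""

-- A's scan: for key in pairs: if len(pairs[key]) < shortest_len: update (shortest_len, shortest)
def pvScan (pairs : List (String × String)) : Int × Option String :=
  pairs.foldl (fun st kv =>
    if PySem.Str.len (pvLookup pairs kv.1) < st.1 then
      (PySem.Str.len (pvLookup pairs kv.1), some kv.1)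
    else st) ((10000000000000000 : Int), none)

-- termination helper for sort_by_len (cited in its decreasing_by)
theorem pvScan_sound (pairs : List (String × String)) (k : String)
    (h : (pvScan pairs).2 = some k) : ∃ kv ∈ pairs, kv.1 = k := by
  unfold pvScan at h
  suffices H : ∀ (xs : List (String × String)) (st : Int × Option String),
      (xs.foldl (fun st kv =>
        if PySem.Str.len (pvLookup pairs kv.1) < st.1 then
          (PySem.Str.len (pvLookup pairs kv.1), some kv.1)
        else st) st).2 = some k → st.2 = some k ∨ ∃ kv ∈ xs, kv.1 = k by
    rcases H pairs _ h with h' | h'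
    · simp at h'
    · exact h'
  intro xs
  induction xs with
  | nil => intro st h; exact Or.inl h
  | cons x t ih =>
    intro st h
    simp only [List.foldl_cons] at h
    rcases ih _ h with h' | h'
    · split at h'
      · simp at h'
        exact Or.inr ⟨x, by simp, h'⟩
      · exact Or.inl h'
    · exact Or.inr ⟨h'.choose, by rcases h'.choose_spec with ⟨hm, hk⟩; exact ⟨by simp [hm], hk⟩⟩

def sort_by_len (pairs : List (String × String)) : List (List String) :=
  if pairs.length = 0 then []
  else
    match h : (pvScan pairs).2 with
    | none => []   -- Python raises KeyError here (pairs[None]); outside Pre_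
    | some k => [[k, pvLookup pairs k]] ++ sort_by_len (pairs.eraseP (fun p => p.1 == k))
termination_by pairs.length
decreasing_by
  rcases pvScan_sound pairs k h with ⟨kv, hmem, hk⟩
  have : (pairs.eraseP (fun p => p.1 == k)).length = pairs.length - 1 :=
    List.length_eraseP_of_mem hmem (by simp [hk])
  have hpos : 0 < pairs.length := List.length_pos_of_mem hmem
  omega

-- ===== PORT B =====
def sort_by_len_alt (pairs : List (String × String)) : List (List String) :=
  (PySem.List.sorted pairs (fun kv => PySem.Str.len kv.2) false).map (fun kv => [kv.1, kv.2])

-- ===== PRECONDITION & SPEC =====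
-- Pre_ excludes (a) duplicate keys, impossible in A's Python input (a dict), on which the
-- association-list ports' first-match lookup would not model dict collapse, and (b) values of
-- length ≥ 10^16, on which A's sentinel leaves shortest = None and A raises KeyError.
def Pre_sort_by_len (pairs : List (String × String)) : Prop :=
  (pairs.map Prod.fst).Nodup ∧ ∀ kv ∈ pairs, PySem.Str.len kv.2 < 10000000000000000
instance (pairs : List (String × String)) : Decidable (Pre_sort_by_len pairs) := by
  unfold Pre_sort_by_len; infer_instance

def pvWitness_sort_by_len : (List (String × String)) := [("a", "xx"), ("b", "x"), ("c", "xyz")]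

def Spec_sort_by_len (pairs : List (String × String)) (out : List (List String)) : Prop := out = sort_by_len_alt pairs
instance (pairs : List (String × String)) (out : List (List String)) : Decidable (Spec_sort_by_len pairs out) := by unfold Spec_sort_by_len; infer_instance

-- ===== CLAIM (what is proved, stated in full; the proofs are below) =====
def Claim_equal_sort_by_len : Prop := ∀ (pairs : List (String × String)), Dom_sort_by_len pairs → Pre_sort_by_len pairs → Spec_sort_by_len pairs (sort_by_len pairs)

-- ===== LEMMAS AND PROOFS =====

-- value-length key used throughout the proofs
def pvKey (kv : String × String) : Int := PySem.Str.len kv.2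

-- dict lookup of a present key under nodup keys yields that pair's value
theorem pvLookup_eq (pairs : List (String × String)) (kv : String × String)
    (hnd : (pairs.map Prod.fst).Nodup) (hmem : kv ∈ pairs) :
    pvLookup pairs kv.1 = kv.2 := by
  induction pairs with
  | nil => simp at hmem
  | cons x t ih =>
    simp only [List.map_cons, List.nodup_cons] at hnd
    rcases List.mem_cons.mp hmem with h | h
    · subst h; simp [pvLookup]
    · have hne : x.1 ≠ kv.1 := fun he => hnd.1 (he ▸ List.mem_map_of_mem h)
      have : pvLookup (x :: t) kv.1 = pvLookup t kv.1 := by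
        simp [pvLookup, show (x.1 == kv.1) = false by simp [hne]]
      rw [this]; exact ih hnd.2 h

-- every nonempty list splits at its FIRST value-length minimum
theorem exists_first_min (pairs : List (String × String)) (hne : pairs ≠ []) :
    ∃ l m r, pairs = l ++ m :: r ∧ (∀ y ∈ l, pvKey m < pvKey y) ∧ (∀ y ∈ r, pvKey m ≤ pvKey y) := by
  induction pairs with
  | nil => exact absurd rfl hne
  | cons x t ih =>
    rcases Decidable.em (t = []) with ht | ht
    · exact ⟨[], x, [], by simp [ht], by simp, by simp⟩
    · rcases ih ht with ⟨l, m, r, hdecomp, hl, hr⟩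
      rcases Decidable.em (pvKey x ≤ pvKey m) with hx | hx
      · refine ⟨[], x, t, rfl, by simp, ?_⟩
        intro y hy
        rw [hdecomp] at hy
        rcases List.mem_append.mp hy with h | h
        · exact le_trans hx (le_of_lt (hl y h))
        · rcases List.mem_cons.mp h with h | h
          · exact h ▸ hx
          · exact le_trans hx (hr y h)
      · exact ⟨x :: l, m, r, by simp [hdecomp], fun y hy => by
          rcases List.mem_cons.mp hy with h | h
          · exact h ▸ (not_le.mp hx)
          · exact hl y h, hr⟩

-- under nodup keys A's scan reads each pair's own value
theorem pvScan_key (pairs : List (String × String)) (hnd : (pairs.map Prod.fst).Nodup) :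
    pvScan pairs = pairs.foldl (fun st kv => if pvKey kv < st.1 then (pvKey kv, some kv.1) else st)
      ((10000000000000000 : Int), none) := by
  unfold pvScan
  refine PySem.List.foldl_congr_mem pairs _ _ _ ?_
  intro st kv hmem
  rw [pvLookup_eq pairs kv hnd hmem]
  rfl

theorem foldl_key_gt (c : Int) : ∀ (l : List (String × String)) (st : Int × Option String),
    (∀ y ∈ l, c < pvKey y) → c < st.1 →
    c < (l.foldl (fun st kv => if pvKey kv < st.1 then (pvKey kv, some kv.1) else st) st).1 := by
  intro l
  induction l with
  | nil => intro st _ h; exact h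
  | cons x t ih =>
    intro st h hst
    simp only [List.foldl_cons]
    refine ih _ (fun y hy => h y (by simp [hy])) ?_
    split
    · exact h x (by simp)
    · exact hst

theorem foldl_key_fix : ∀ (r : List (String × String)) (st : Int × Option String),
    (∀ x ∈ r, st.1 ≤ pvKey x) →
    r.foldl (fun st kv => if pvKey kv < st.1 then (pvKey kv, some kv.1) else st) st = st := by
  intro r
  induction r with
  | nil => intro st _; rfl
  | cons x t ih =>
    intro st h
    simp only [List.foldl_cons]
    rw [if_neg (not_lt.mpr (h x (by simp)))]
    exact ih st (fun y hy => h y (by simp [hy]))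

-- A's scan finds exactly the first value-length minimum
theorem pvScan_first_min (l : List (String × String)) (m : String × String) (r : List (String × String))
    (hnd : ((l ++ m :: r).map Prod.fst).Nodup)
    (hl : ∀ y ∈ l, pvKey m < pvKey y) (hr : ∀ y ∈ r, pvKey m ≤ pvKey y)
    (hm : pvKey m < 10000000000000000) :
    pvScan (l ++ m :: r) = (pvKey m, some m.1) := by
  rw [pvScan_key _ hnd, List.foldl_append, List.foldl_cons]
  have h1 := foldl_key_gt (pvKey m) l ((10000000000000000 : Int), none) hl hm
  rw [if_pos h1]
  exact foldl_key_fix r _ (fun x hx => hr x hx)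

-- stable-sort head lemma: B's sort pulls the first minimum to the front
theorem insertBy_front {α : Type} (before : α → α → Bool) (m : α) (acc : List α)
    (h : ∀ y ∈ acc, before m y = true) : PySem.List.insertBy before m acc = m :: acc := by
  cases acc with
  | nil => rfl
  | cons a t => simp [PySem.List.insertBy, h a (by simp)]

theorem foldl_insertBy_head {α : Type} (before : α → α → Bool) (m : α) (r : List α) :
    ∀ acc : List α, (∀ x ∈ r, before x m = false) →
    r.foldl (fun acc x => PySem.List.insertBy before x acc) (m :: acc)
      = m :: r.foldl (fun acc x => PySem.List.insertBy before x acc) acc := by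
  induction r with
  | nil => intro acc _; rfl
  | cons x t ih =>
    intro acc h
    have hx : PySem.List.insertBy before x (m :: acc) = m :: PySem.List.insertBy before x acc := by
      simp [PySem.List.insertBy, h x (by simp)]
    simp only [List.foldl_cons, hx]
    exact ih _ (fun y hy => h y (by simp [hy]))

theorem sorted_first_min {α : Type} (key : α → Int) (l : List α) (m : α) (r : List α)
    (hl : ∀ y ∈ l, key m < key y) (hr : ∀ y ∈ r, key m ≤ key y) :
    PySem.List.sorted (l ++ m :: r) key false = m :: PySem.List.sorted (l ++ r) key false := by
  rw [PySem.List.sorted_eq_foldl_insertBy, PySem.List.sorted_eq_foldl_insertBy]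
  rw [List.foldl_append, List.foldl_append, List.foldl_cons]
  rw [insertBy_front _ m _ (fun y hy => by
    have : y ∈ l := by
      have := PySem.List.mem_sorted (xs := l) (key := key) (rev := false) (x := y)
      rw [← PySem.List.sorted_eq_foldl_insertBy] at hy
      exact this.mp hy
    simp [hl y this])]
  exact foldl_insertBy_head _ m r _ (fun x hx => by simp [not_lt.mpr (hr x hx)])

-- main induction on the number of pairs
set_option maxHeartbeats 1000000 in
theorem pv_main : ∀ (n : Nat) (pairs : List (String × String)), pairs.length ≤ n →
    Pre_sort_by_len pairs → sort_by_len pairs = sort_by_len_alt pairs := by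
  intro n
  induction n with
  | zero =>
    intro pairs h _
    have : pairs = [] := List.eq_nil_of_length_eq_zero (Nat.le_zero.mp h)
    subst this
    rw [sort_by_len]; simp [sort_by_len_alt, PySem.List.sorted_eq_nil_iff]
  | succ n ih =>
    intro pairs hlen hpre
    rcases Decidable.em (pairs = []) with hnil | hnil
    · subst hnil; rw [sort_by_len]; simp [sort_by_len_alt, PySem.List.sorted_eq_nil_iff]
    · obtain ⟨l, m, r, hdecomp, hl, hr⟩ := exists_first_min pairs hnil
      obtain ⟨hnd, hbd⟩ := hpre
      have hmem : m ∈ pairs := by rw [hdecomp]; simp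
      have hm : pvKey m < 10000000000000000 := hbd m hmem
      have hscan : (pvScan pairs).2 = some m.1 := by
        rw [hdecomp, pvScan_first_min l m r (hdecomp ▸ hnd) hl hr hm]
      -- keys of l are distinct from m.1
      have hdisj : ∀ y ∈ l, y.1 ≠ m.1 := by
        intro y hy he
        have h' : ((l ++ m :: r).map Prod.fst).Nodup := hdecomp ▸ hnd
        rw [List.map_append, List.map_cons] at h'
        exact (List.disjoint_of_nodup_append h') (List.mem_map_of_mem hy) (by simp [he])
      have herase : pairs.eraseP (fun p => p.1 == m.1) = l ++ r := by
        rw [hdecomp, List.eraseP_append_right _ (fun y hy => by simp [hdisj y hy]),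
            List.eraseP_cons_of_pos (by simp)]
      -- the tail still satisfies Pre_
      have hsub : (l ++ r).Sublist pairs := by
        rw [hdecomp]; exact (List.Sublist.refl l).append (List.sublist_cons_self m r)
      have hpre' : Pre_sort_by_len (l ++ r) :=
        ⟨((hsub.map Prod.fst).nodup hnd), fun kv hkv => hbd kv (hsub.mem hkv)⟩
      have hlen' : (l ++ r).length ≤ n := by
        have := hsub.length_le
        have : (l ++ r).length < pairs.length := by
          rw [hdecomp]; simp
        omega
      -- unfold A one step
      rw [sort_by_len]
      rw [if_neg (by simp [hnil])]
      have halt : ∀ xs, sort_by_len_alt xs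
          = (PySem.List.sorted xs pvKey false).map (fun kv => [kv.1, kv.2]) := fun xs => rfl
      have hfold : sort_by_len_alt pairs
          = [m.1, m.2] :: sort_by_len_alt (l ++ r) := by
        rw [halt, halt, hdecomp, sorted_first_min pvKey l m r hl hr]
        simp
      split
      · next heq => rw [hscan] at heq; exact absurd heq (by simp)
      · next k heq =>
        rw [hscan] at heq
        have hk : k = m.1 := by injection heq with h2; exact h2.symm
        subst hk
        rw [pvLookup_eq pairs m hnd hmem, herase, ih _ hlen' hpre', hfold]
        rfl

-- ===== VERDICT (by name: the statement is the Claim_ definition above) =====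
theorem sort_by_len_spec : Claim_equal_sort_by_len := by
  intro pairs _ hpre
  unfold Spec_sort_by_len
  exact pv_main pairs.length pairs (le_refl _) hpre
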